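-- pv_equiv track=rewrite | github.com/teorems/Pycharm-Projects | NumericMatrixProcessor.py | matrix_transposition
-- ===== SOURCE A (Python) =====
-- def matrix_transposition(matrix, choice1):
--     transposed = []
--     columns = len(matrix[0])
--     rows = len(matrix)
--     if choice1 == 1:
--
--         for i in range(columns):
--             transposed.append([])
--             for k in range(rows):
--                 transposed[i].append(matrix[k][i])
--
--     if choice1 == 2:
--
--         for i in range(columns):
--             # create the empty list
--             transposed.append([])
--             # range through the rows and append every column starting from
--             # the last element
--             for j in range(rows - 1, -1, -1):
--                 transposed[i].append(matrix[j][-1 - i])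
--
--     if choice1 == 3:
--         for i in range(rows):
--             transposed.append([])
--             for j in range(columns - 1, -1, -1):
--                 transposed[i].append(matrix[i][j])
--
--     if choice1 == 4:
--         transposed = matrix[::-1]
--
--     return transposed
-- ===== SOURCE B (Python) =====
-- def matrix_transposition(matrix, choice1):
--     # Scatter formulation: instead of gathering each output cell from the input
--     # with nested index loops, preallocate the output grid and make ONE pass over
--     # the input cells, writing each element at its destination coordinate.
--     rows = len(matrix)
--     cols = len(matrix[0])
--     if choice1 == 4:
--         out = [None] * rows
--         for r, row in enumerate(matrix):
--             out[rows - 1 - r] = row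
--         return out
--     if choice1 == 1:
--         dest, shape = (lambda r, c: (c, r)), (cols, rows)
--     elif choice1 == 2:
--         dest, shape = (lambda r, c: (cols - 1 - c, rows - 1 - r)), (cols, rows)
--     elif choice1 == 3:
--         dest, shape = (lambda r, c: (r, cols - 1 - c)), (rows, cols)
--     else:
--         return []
--     out = [[0] * shape[1] for _ in range(shape[0])]
--     for r, row in enumerate(matrix):
--         for c, x in enumerate(row):
--             i, j = dest(r, c)
--             out[i][j] = x
--     return out
-- ===== Notes on version B (the rewrite author's own statement) =====
-- stated objective: alternative
-- what changed: Inverts the data flow: instead of A's per-output-cell gather (nested index loops reading matrix[...] for each output position), B preallocates the output grid and makes one scatter pass over the input cells, writing each element to its destination coordinate given by a per-choice coordinate map; choice 4 scatters whole rows.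
-- outside the precondition, e.g. on matrix_transposition([[1, 2], [3, 4, 5]], 3): A returns [[2, 1], [4, 3]], B returns [[2, 1], [4, 5]]; on matrix_transposition([[1, 2], [3, 4, 5]], 2): A returns [[5, 2], [4, 1]], B returns [[4, 2], [5, 1]]
import Mathlib
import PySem

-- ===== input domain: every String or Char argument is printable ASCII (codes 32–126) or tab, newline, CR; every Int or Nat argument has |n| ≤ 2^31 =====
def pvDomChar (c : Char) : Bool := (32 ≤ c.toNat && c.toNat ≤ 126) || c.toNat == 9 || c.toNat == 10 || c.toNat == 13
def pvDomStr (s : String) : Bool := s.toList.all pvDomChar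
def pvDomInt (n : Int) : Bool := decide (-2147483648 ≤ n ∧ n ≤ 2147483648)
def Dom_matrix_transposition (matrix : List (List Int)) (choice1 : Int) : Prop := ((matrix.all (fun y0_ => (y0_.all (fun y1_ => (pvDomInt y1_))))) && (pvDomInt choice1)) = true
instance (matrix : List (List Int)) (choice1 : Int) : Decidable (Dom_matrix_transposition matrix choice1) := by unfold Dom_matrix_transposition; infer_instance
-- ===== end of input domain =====

-- B inverts the data flow: A gathers each output cell with nested index loops; B makes one
-- scatter pass over the input cells, writing each into a preallocated grid (alternative; same cost).

-- ===== PORT A =====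
def matrix_transposition (matrix : List (List Int)) (choice1 : Int) : List (List Int) :=
  let columns : Int := (PySem.List.pyGetD matrix 0 []).length
  let rows : Int := matrix.length
  let transposed : List (List Int) := []
  let transposed :=
    if choice1 = 1 then
      (PySem.List.pyRange 0 columns 1).foldl (fun t i =>
        t ++ [(PySem.List.pyRange 0 rows 1).foldl (fun r k =>
          r ++ [PySem.List.pyGetD (PySem.List.pyGetD matrix k []) i 0]) []]) transposed
    else transposed
  let transposed :=
    if choice1 = 2 then
      (PySem.List.pyRange 0 columns 1).foldl (fun t i =>
        t ++ [(PySem.List.pyRange (rows - 1) (-1) (-1)).foldl (fun r j =>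
          r ++ [PySem.List.pyGetD (PySem.List.pyGetD matrix j []) (-1 - i) 0]) []]) transposed
    else transposed
  let transposed :=
    if choice1 = 3 then
      (PySem.List.pyRange 0 rows 1).foldl (fun t i =>
        t ++ [(PySem.List.pyRange (columns - 1) (-1) (-1)).foldl (fun r j =>
          r ++ [PySem.List.pyGetD (PySem.List.pyGetD matrix i []) j 0]) []]) transposed
    else transposed
  let transposed :=
    if choice1 = 4 then (PySem.List.slice? matrix none none (-1)).getD [] else transposed
  transposed

-- ===== PORT B =====
-- Transliteration of Source B: preallocated output grid, one scatter pass over the input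
-- cells through a per-choice destination-coordinate map; choice 4 scatters whole rows.
-- (Source B's `len(matrix[0])` raises on [] — outside Pre_; the 0-filled grid mirrors Source B's.)
def matrix_transposition_alt (matrix : List (List Int)) (choice1 : Int) : List (List Int) :=
  let rows := matrix.length
  let cols := (matrix.headD []).length
  if choice1 = 4 then
    matrix.zipIdx.foldl (fun out p => out.set (rows - 1 - p.2) p.1)
      (List.replicate rows ([] : List Int))
  else
    let ds : Option ((Nat → Nat → Nat × Nat) × Nat × Nat) :=
      if choice1 = 1 then some ((fun r c => (c, r)), (cols, rows))
      else if choice1 = 2 then some ((fun r c => (cols - 1 - c, rows - 1 - r)), (cols, rows))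
      else if choice1 = 3 then some ((fun r c => (r, cols - 1 - c)), (rows, cols))
      else none
    match ds with
    | none => []
    | some (dest, h, w) =>
      matrix.zipIdx.foldl (fun out q =>
        q.1.zipIdx.foldl (fun out p =>
          let ij := dest q.2 p.2
          out.set ij.1 ((out.getD ij.1 []).set ij.2 p.1)) out)
        (List.replicate h (List.replicate w 0))

-- ===== PRECONDITION & SPEC =====
-- Pre_ requires a nonempty matrix and, for choices 1-3, rectangular rows: A raises IndexError on
-- the empty matrix and on rows shorter than the first, and a ragged "matrix" is outside the
-- function's natural domain (on ragged input with longer rows A silently reads by index/negative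
-- index relative to the first row's length, an accident neither program should specify).
def Pre_matrix_transposition (matrix : List (List Int)) (choice1 : Int) : Prop :=
  matrix ≠ [] ∧ ((choice1 = 1 ∨ choice1 = 2 ∨ choice1 = 3) →
    ∀ r ∈ matrix, r.length = (matrix.headD []).length)
instance (matrix : List (List Int)) (choice1 : Int) : Decidable (Pre_matrix_transposition matrix choice1) := by
  unfold Pre_matrix_transposition; infer_instance
def pvWitness_matrix_transposition : List (List Int) × Int := ([[1, 2], [3, 4]], 1)

def Spec_matrix_transposition (matrix : List (List Int)) (choice1 : Int) (out : List (List Int)) : Prop := out = matrix_transposition_alt matrix choice1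
instance (matrix : List (List Int)) (choice1 : Int) (out : List (List Int)) : Decidable (Spec_matrix_transposition matrix choice1 out) := by unfold Spec_matrix_transposition; infer_instance

-- ===== CLAIM (what is proved, stated in full; the proofs are below) =====
def Claim_equal_matrix_transposition : Prop := ∀ (matrix : List (List Int)) (choice1 : Int), Dom_matrix_transposition matrix choice1 → Pre_matrix_transposition matrix choice1 → Spec_matrix_transposition matrix choice1 (matrix_transposition matrix choice1)

-- ===== LEMMAS AND PROOFS =====

-- cell access and a single scatter write, for reasoning about B's fold
def pvGetCell (out : List (List Int)) (i j : Nat) : Int := (out.getD i []).getD j 0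

def pvWrite (out : List (List Int)) (t : Nat × Nat × Int) : List (List Int) :=
  out.set t.1 ((out.getD t.1 []).set t.2.1 t.2.2)

lemma length_pvWrite (out : List (List Int)) (t : Nat × Nat × Int) :
    (pvWrite out t).length = out.length := by simp [pvWrite]

lemma getD_set_list {α : Type} (l : List α) (i j : Nat) (a d : α) :
    (l.set i a).getD j d = if i = j ∧ i < l.length then a else l.getD j d := by
  simp only [List.getD_eq_getElem?_getD, List.getElem?_set]
  split_ifs with h1 h2 h3 h3 <;> simp_all <;> omega

lemma rowlen_pvWrite (out : List (List Int)) (t : Nat × Nat × Int) (a : Nat) :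
    ((pvWrite out t).getD a []).length = (out.getD a []).length := by
  simp only [pvWrite, getD_set_list]
  split_ifs with h
  · rw [← h.1]; simp
  · rfl

lemma cell_pvWrite (out : List (List Int)) (t : Nat × Nat × Int) (i j : Nat)
    (hb : t.1 < out.length ∧ t.2.1 < (out.getD t.1 []).length) :
    pvGetCell (pvWrite out t) i j =
      if t.1 = i ∧ t.2.1 = j then t.2.2 else pvGetCell out i j := by
  simp only [pvGetCell, pvWrite]
  rw [getD_set_list]
  by_cases h1 : t.1 = i
  · subst h1
    rw [if_pos ⟨rfl, hb.1⟩, getD_set_list]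
    by_cases h2 : t.2.1 = j
    · subst h2
      rw [if_pos ⟨rfl, hb.2⟩, if_pos ⟨rfl, rfl⟩]
    · rw [if_neg (by tauto), if_neg (by tauto)]
  · rw [if_neg (by tauto), if_neg (by tauto)]

lemma length_foldl_pvWrite (L : List (Nat × Nat × Int)) : ∀ (out : List (List Int)),
    (L.foldl pvWrite out).length = out.length := by
  induction L with
  | nil => intro out; rfl
  | cons t L ih => intro out; rw [List.foldl_cons, ih, length_pvWrite]

lemma rowlen_foldl_pvWrite (L : List (Nat × Nat × Int)) : ∀ (out : List (List Int)) (a : Nat),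
    ((L.foldl pvWrite out).getD a []).length = (out.getD a []).length := by
  induction L with
  | nil => intro out a; rfl
  | cons t L ih => intro out a; rw [List.foldl_cons, ih, rowlen_pvWrite]

-- last-write-wins characterisation of the scatter fold
lemma cell_foldl_pvWrite (L : List (Nat × Nat × Int)) : ∀ (out : List (List Int)) (i j : Nat),
    (∀ t ∈ L, t.1 < out.length ∧ t.2.1 < (out.getD t.1 []).length) →
    pvGetCell (L.foldl pvWrite out) i j =
      (match L.reverse.find? (fun t => t.1 == i && t.2.1 == j) with
       | some t => t.2.2
       | none => pvGetCell out i j) := by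
  induction L with
  | nil => intro out i j _; rfl
  | cons t L ih =>
    intro out i j hb
    rw [List.foldl_cons]
    rw [ih (pvWrite out t) i j (by
      intro s hs
      have := hb s (List.mem_cons_of_mem _ hs)
      rw [length_pvWrite, rowlen_pvWrite]; exact this)]
    rw [List.reverse_cons, List.find?_append]
    cases hfind : L.reverse.find? (fun t => t.1 == i && t.2.1 == j) with
    | some s => simp [Option.or]
    | none =>
      simp only [Option.or, List.find?_singleton]
      rw [cell_pvWrite out t i j (hb t List.mem_cons_self)]
      by_cases hp : t.1 = i ∧ t.2.1 = j
      · have : (t.1 == i && t.2.1 == j) = true := by simp [hp.1, hp.2]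
        simp [this, hp]
      · have : (t.1 == i && t.2.1 == j) = false := by
          simp only [Bool.and_eq_false_iff, beq_eq_false_iff_ne]
          by_cases h1 : t.1 = i
          · right; intro h2; exact hp ⟨h1, h2⟩
          · left; exact h1
        simp [this, hp]

-- the first match is THE match when the predicate determines the element
lemma find?_eq_some_of_unique {α : Type} (l : List α) (p : α → Bool) (a : α)
    (ha : a ∈ l) (hpa : p a = true) (huniq : ∀ b ∈ l, p b = true → b = a) :
    l.find? p = some a := by
  induction l with
  | nil => cases ha
  | cons x l ih =>
    by_cases hx : p x = true
    · rw [List.find?_cons_of_pos hx]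
      rw [huniq x List.mem_cons_self hx]
    · rw [List.find?_cons_of_neg hx]
      cases ha with
      | head => exact absurd hpa hx
      | tail _ h =>
        exact ih h (fun b hb hpb => huniq b (List.mem_cons_of_mem _ hb) hpb)

-- the flat list of scatter writes generated by the input cells
def pvCells (m : List (List Int)) (dest : Nat → Nat → Nat × Nat) : List (Nat × Nat × Int) :=
  m.zipIdx.flatMap (fun q => q.1.zipIdx.map (fun p => ((dest q.2 p.2).1, (dest q.2 p.2).2, p.1)))

-- B's nested fold is the flat scatter fold over pvCells
lemma nested_eq_flat (m : List (List Int)) (dest : Nat → Nat → Nat × Nat)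
    (init : List (List Int)) :
    m.zipIdx.foldl (fun out q =>
        q.1.zipIdx.foldl (fun out p =>
          out.set (dest q.2 p.2).1
            ((out.getD (dest q.2 p.2).1 []).set (dest q.2 p.2).2 p.1)) out) init
      = (pvCells m dest).foldl pvWrite init := by
  rw [pvCells, List.foldl_flatMap]
  congr 1
  funext out q
  rw [List.foldl_map]
  rfl

lemma mem_pvCells {m : List (List Int)} {dest : Nat → Nat → Nat × Nat}
    {t : Nat × Nat × Int} :
    t ∈ pvCells m dest ↔ ∃ r c, r < m.length ∧ c < (m.getD r []).length ∧
      t = ((dest r c).1, (dest r c).2, (m.getD r []).getD c 0) := by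
  simp only [pvCells, List.mem_flatMap, List.mem_map]
  constructor
  · rintro ⟨q, hq, p, hp, rfl⟩
    have hq' := List.mem_zipIdx_iff_getElem?.mp hq
    have hr : q.2 < m.length := by
      rcases List.getElem?_eq_some_iff.mp hq' with ⟨h, _⟩; exact h
    have hq1 : m.getD q.2 [] = q.1 := by
      rw [List.getD_eq_getElem?_getD, hq']; rfl
    have hp' := List.mem_zipIdx_iff_getElem?.mp hp
    have hc : p.2 < q.1.length := by
      rcases List.getElem?_eq_some_iff.mp hp' with ⟨h, _⟩; exact h
    have hp1 : q.1.getD p.2 0 = p.1 := by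
      rw [List.getD_eq_getElem?_getD, hp']; rfl
    exact ⟨q.2, p.2, hr, by rw [hq1]; exact hc, by rw [hq1, hp1]⟩
  · rintro ⟨r, c, hr, hc, rfl⟩
    refine ⟨(m.getD r [], r), ?_, (((m.getD r []).getD c 0), c), ?_, rfl⟩
    · exact List.mem_zipIdx_iff_getElem?.mpr (by
        rw [List.getElem?_eq_getElem hr, List.getD_eq_getElem _ _ hr])
    · exact List.mem_zipIdx_iff_getElem?.mpr (by
        rw [List.getElem?_eq_getElem hc, List.getD_eq_getElem _ _ hc])

-- main scatter characterisation: on a rectangular matrix, scattering through an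
-- invertible destination map produces the gather closed form along the inverse map
lemma scatter_eq (m : List (List Int)) (n cols : Nat) (hn : m.length = n)
    (hrect : ∀ r ∈ m, r.length = cols)
    (dest inv : Nat → Nat → Nat × Nat) (h w : Nat)
    (hb : ∀ r c, r < n → c < cols → (dest r c).1 < h ∧ (dest r c).2 < w)
    (hinv : ∀ i j, i < h → j < w →
      (inv i j).1 < n ∧ (inv i j).2 < cols ∧ dest (inv i j).1 (inv i j).2 = (i, j))
    (huniq : ∀ r c i j, r < n → c < cols → dest r c = (i, j) → (r, c) = inv i j) :
    (pvCells m dest).foldl pvWrite (List.replicate h (List.replicate w 0))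
      = (List.range h).map (fun i => (List.range w).map (fun j =>
          pvGetCell m (inv i j).1 (inv i j).2)) := by
  have hrowlen : ∀ r, r < n → (m.getD r []).length = cols := by
    intro r hr
    exact hrect _ (by rw [List.getD_eq_getElem _ _ (by omega)]; exact List.getElem_mem _)
  have hboundsL : ∀ t ∈ pvCells m dest,
      t.1 < (List.replicate h (List.replicate w 0) : List (List Int)).length ∧
      t.2.1 < ((List.replicate h (List.replicate w 0) : List (List Int)).getD t.1 []).length := by
    intro t ht
    obtain ⟨r, c, hr, hc, rfl⟩ := mem_pvCells.mp ht
    have hc' : c < cols := by rw [← hrowlen r (by omega)]; exact hc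
    have := hb r c (by omega) hc'
    constructor
    · simpa using this.1
    · rw [List.getD_eq_getElem (List.replicate h (List.replicate w 0)) ([] : List Int)
        (n := (dest r c).1) (by simpa using this.1)]
      simpa using this.2
  apply List.ext_getElem
  · rw [length_foldl_pvWrite]; simp
  · intro i h1 h2
    have hlen := length_foldl_pvWrite (pvCells m dest) (List.replicate h (List.replicate w 0))
    have hih : i < h := by rw [hlen] at h1; simpa using h1
    apply List.ext_getElem
    · have := rowlen_foldl_pvWrite (pvCells m dest) (List.replicate h (List.replicate w 0)) i
      rw [List.getD_eq_getElem _ _ h1, List.getD_eq_getElem _ _ (by simpa using hih)] at this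
      simp only [List.getElem_replicate] at this
      simp [this]
    · intro j hj1 hj2
      have hrl := rowlen_foldl_pvWrite (pvCells m dest) (List.replicate h (List.replicate w 0)) i
      rw [List.getD_eq_getElem _ _ h1, List.getD_eq_getElem _ _ (by simpa using hih)] at hrl
      simp only [List.getElem_replicate] at hrl
      have hjw : j < w := by rw [hrl] at hj1; simpa using hj1
      simp only [List.getElem_map, List.getElem_range]
      -- reduce both getElems to pvGetCell
      have hLHS : ((pvCells m dest).foldl pvWrite
          (List.replicate h (List.replicate w 0)))[i][j] =
          pvGetCell ((pvCells m dest).foldl pvWrite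
            (List.replicate h (List.replicate w 0))) i j := by
        rw [pvGetCell, List.getD_eq_getElem _ _ h1, List.getD_eq_getElem _ _ hj1]
      rw [hLHS, cell_foldl_pvWrite _ _ _ _ hboundsL]
      obtain ⟨hrn, hcc, hdij⟩ := hinv i j hih hjw
      have hfind : (pvCells m dest).reverse.find? (fun t => t.1 == i && t.2.1 == j) =
          some (i, j, (m.getD (inv i j).1 []).getD (inv i j).2 0) := by
        apply find?_eq_some_of_unique
        · rw [List.mem_reverse]
          apply mem_pvCells.mpr
          exact ⟨(inv i j).1, (inv i j).2, by omega,
            by rw [hrowlen _ (by omega)]; exact hcc, by rw [hdij]⟩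
        · simp
        · intro b hb' hpb
          obtain ⟨r, c, hr, hc, rfl⟩ := mem_pvCells.mp (List.mem_reverse.mp hb')
          have hc' : c < cols := by rw [← hrowlen r (by omega)]; exact hc
          simp only [Bool.and_eq_true, beq_iff_eq] at hpb
          have hd : dest r c = (i, j) := by
            rcases hpb with ⟨e1, e2⟩
            exact Prod.ext e1 e2
          have := huniq r c i j (by omega) hc' hd
          have hr' : r = (inv i j).1 := congrArg Prod.fst this
          have hcEq : c = (inv i j).2 := congrArg Prod.snd this
          rw [hd, hr', hcEq]
      rw [hfind]
      rfl

-- choice 4's row scatter fills the grid with the reversed matrix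
lemma rev_fill (n : Nat) : ∀ (l : List (List Int)) (k : Nat) (out : List (List Int)),
    k + l.length = n → out.length = n →
    (l.zipIdx k).foldl (fun o p => o.set (n - 1 - p.2) p.1) out
      = l.reverse ++ out.drop l.length := by
  intro l
  induction l with
  | nil => intro k out _ _; simp
  | cons a t ih =>
    intro k out hk hout
    rw [List.length_cons] at hk
    rw [List.zipIdx_cons, List.foldl_cons]
    have hpos : n - 1 - k = t.length := by omega
    have htn : t.length < out.length := by omega
    rw [hpos, ih (k + 1) _ (by omega) (by simpa using hout)]
    have hdrop : (out.set t.length a).drop t.length = a :: out.drop (t.length + 1) := by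
      rw [List.drop_eq_getElem_cons (by simpa using htn)]
      rw [List.getElem_set_self]
      congr 1
      rw [List.drop_set]
      simp
    rw [hdrop]
    simp

theorem matrix_transposition_spec : Claim_equal_matrix_transposition := by
  intro m ch _ hpre
  obtain ⟨hm, hrect⟩ := hpre
  unfold Spec_matrix_transposition
  have hget0 : PySem.List.pyGetD m 0 ([] : List Int) = m.headD [] := by
    rw [PySem.List.pyGetD_zero]; cases m <;> simp
  have hn0 : 0 < m.length := List.length_pos_iff.mpr hm
  by_cases h1 : ch = 1
  · subst h1
    have hrc := hrect (Or.inl rfl)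
    -- A side
    simp only [matrix_transposition, matrix_transposition_alt, hget0,
      show ((1:Int) = 2) ↔ False from by norm_num,
      show ((1:Int) = 3) ↔ False from by norm_num,
      show ((1:Int) = 4) ↔ False from by norm_num,
      if_true, if_false]
    simp only [PySem.List.foldl_append_singleton_eq_map, List.nil_append,
      PySem.List.pyRange_zero_nat, List.map_map, Function.comp_def,
      PySem.List.pyGetD_natCast]
    -- B side
    rw [nested_eq_flat m (fun r c => (c, r)),
      scatter_eq m m.length (m.headD []).length rfl hrc
        (fun r c => (c, r)) (fun i j => (j, i)) (m.headD []).length m.length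
        (fun r c hr hc => ⟨hc, hr⟩)
        (fun i j hi hj => ⟨hj, hi, rfl⟩)
        (fun r c i j _ _ hd => by
          simp only [Prod.mk.injEq] at hd; simp [hd.1, hd.2])]
    apply List.map_congr_left
    intro i _
    apply List.map_congr_left
    intro k _
    rfl
  by_cases h2 : ch = 2
  · subst h2
    have hrc := hrect (Or.inr (Or.inl rfl))
    have hrowlen : ∀ r, r < m.length → (m.getD r []).length = (m.headD []).length := by
      intro r hr
      exact hrc _ (by rw [List.getD_eq_getElem _ _ hr]; exact List.getElem_mem _)
    have hrange : ((m.length : Int) - 1 - -1).toNat = m.length := by omega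
    simp only [matrix_transposition, matrix_transposition_alt, hget0,
      show ((2:Int) = 1) ↔ False from by norm_num,
      show ((2:Int) = 3) ↔ False from by norm_num,
      show ((2:Int) = 4) ↔ False from by norm_num,
      if_true, if_false]
    simp only [PySem.List.foldl_append_singleton_eq_map, List.nil_append,
      PySem.List.pyRange_neg_one, hrange, PySem.List.pyRange_zero_nat,
      List.map_map, Function.comp_def]
    rw [nested_eq_flat m (fun r c => ((m.headD []).length - 1 - c, m.length - 1 - r)),
      scatter_eq m m.length (m.headD []).length rfl hrc
        (fun r c => ((m.headD []).length - 1 - c, m.length - 1 - r))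
        (fun i j => (m.length - 1 - j, (m.headD []).length - 1 - i))
        (m.headD []).length m.length
        (fun r c hr hc => by refine ⟨?_, ?_⟩ <;> (beta_reduce; omega))
        (fun i j hi hj => by
          refine ⟨?_, ?_, ?_⟩ <;> beta_reduce <;> simp only [Prod.mk.injEq] <;> omega)
        (fun r c i j hr hc hd => by
          simp only [Prod.mk.injEq] at hd ⊢; omega)]
    apply List.map_congr_left
    intro i hi
    have hic : i < (m.headD []).length := List.mem_range.mp hi
    apply List.map_congr_left
    intro k hk
    have hkn : k < m.length := List.mem_range.mp hk
    have e1 : ((m.length : Int) - 1 - (k : Int)) = ((m.length - 1 - k : Nat) : Int) := by omega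
    rw [e1, PySem.List.pyGetD_natCast]
    have hr : (m.getD (m.length - 1 - k) []).length = (m.headD []).length :=
      hrowlen _ (by omega)
    have e2 : (-1 - (i : Int)) = -(((i + 1 : Nat)) : Int) := by push_cast; ring
    rw [e2, PySem.List.pyGetD_neg_natCast _ (i + 1) 0 (by omega) (by omega)]
    rw [pvGetCell]
    rw [List.getD_eq_getElem (m.getD (m.length - 1 - k) []) 0
      (n := (m.headD []).length - 1 - i) (by omega)]
    congr 1
    omega
  by_cases h3 : ch = 3
  · subst h3
    have hrc := hrect (Or.inr (Or.inr rfl))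
    have hrowlen : ∀ r, r < m.length → (m.getD r []).length = (m.headD []).length := by
      intro r hr
      exact hrc _ (by rw [List.getD_eq_getElem _ _ hr]; exact List.getElem_mem _)
    have hrange : (((m.headD []).length : Int) - 1 - -1).toNat = (m.headD []).length := by omega
    simp only [matrix_transposition, matrix_transposition_alt, hget0,
      show ((3:Int) = 1) ↔ False from by norm_num,
      show ((3:Int) = 2) ↔ False from by norm_num,
      show ((3:Int) = 4) ↔ False from by norm_num,
      if_true, if_false]
    simp only [PySem.List.foldl_append_singleton_eq_map, List.nil_append,
      PySem.List.pyRange_neg_one, hrange, PySem.List.pyRange_zero_nat,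
      List.map_map, Function.comp_def, PySem.List.pyGetD_natCast]
    rw [nested_eq_flat m (fun r c => (r, (m.headD []).length - 1 - c)),
      scatter_eq m m.length (m.headD []).length rfl hrc
        (fun r c => (r, (m.headD []).length - 1 - c))
        (fun i j => (i, (m.headD []).length - 1 - j))
        m.length (m.headD []).length
        (fun r c hr hc => by refine ⟨?_, ?_⟩ <;> (beta_reduce; omega))
        (fun i j hi hj => by
          refine ⟨?_, ?_, ?_⟩ <;> beta_reduce <;> simp only [Prod.mk.injEq, true_and] <;> omega)
        (fun r c i j hr hc hd => by
          simp only [Prod.mk.injEq] at hd ⊢; omega)]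
    apply List.map_congr_left
    intro i hi
    apply List.map_congr_left
    intro k hk
    have hkc : k < (m.headD []).length := List.mem_range.mp hk
    have e1 : (((m.headD []).length : Int) - 1 - (k : Int)) = (((m.headD []).length - 1 - k : Nat) : Int) := by omega
    rw [e1, PySem.List.pyGetD_natCast]
    rfl
  by_cases h4 : ch = 4
  · subst h4
    simp only [matrix_transposition, matrix_transposition_alt, hget0,
      show ((4:Int) = 1) ↔ False from by norm_num,
      show ((4:Int) = 2) ↔ False from by norm_num,
      show ((4:Int) = 3) ↔ False from by norm_num,
      if_true, if_false, PySem.List.slice?_none_none_neg_one, Option.getD_some]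
    rw [rev_fill m.length m 0 _ (by omega) (by simp)]
    simp
  · simp only [matrix_transposition, matrix_transposition_alt,
      if_neg h1, if_neg h2, if_neg h3, if_neg h4]
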